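-- pv_equiv track=rewrite | github.com/srinathalla/python | algo/dp/minimumFallingPathSumII.py | minFallingPathSum2
-- ===== SOURCE A (Python) =====
-- from typing import List
-- import heapq
--
-- def minFallingPathSum2(arr: List[List[int]]) -> int:
--
--     rows, cols = len(arr), len(arr[0])
--
--     for i in range(1, rows):
--         min1, min2 = heapq.nsmallest(2, arr[i-1])
--
--         for j in range(cols):
--             if arr[i-1][j] == min1:
--                 arr[i][j] += min2
--             else:
--                 arr[i][j] += min1
--     return min(arr[-1])
-- ===== SOURCE B (Python) =====
-- from typing import List
--
-- def minFallingPathSum2(arr: List[List[int]]) -> int: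
--     cols = len(arr[0])
--     dp = list(arr[0])
--     for row in arr[1:]:
--         dp = [row[j] + min(dp[k] for k in range(cols) if k != j)
--               for j in range(cols)]
--     return min(dp)
-- ===== Notes on version B (the rewrite author's own statement) =====
-- stated objective: simpler
-- what changed: Replaces A's in-place row mutation with heapq two-smallest precomputation by a purely functional DP: a dp list carried over the rows themselves (for row in arr[1:]), rebuilt each row by a comprehension taking min of dp over the other columns; no index-based mutation of arr and no min1/min2 case analysis. Return-value equivalence only: A mutates arr in place, B does not.
-- outside the precondition, e.g. on minFallingPathSum2([[1, 2], [3, 4, 0], [5, 6]]): A returns 5, B returns 10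
import Mathlib
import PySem

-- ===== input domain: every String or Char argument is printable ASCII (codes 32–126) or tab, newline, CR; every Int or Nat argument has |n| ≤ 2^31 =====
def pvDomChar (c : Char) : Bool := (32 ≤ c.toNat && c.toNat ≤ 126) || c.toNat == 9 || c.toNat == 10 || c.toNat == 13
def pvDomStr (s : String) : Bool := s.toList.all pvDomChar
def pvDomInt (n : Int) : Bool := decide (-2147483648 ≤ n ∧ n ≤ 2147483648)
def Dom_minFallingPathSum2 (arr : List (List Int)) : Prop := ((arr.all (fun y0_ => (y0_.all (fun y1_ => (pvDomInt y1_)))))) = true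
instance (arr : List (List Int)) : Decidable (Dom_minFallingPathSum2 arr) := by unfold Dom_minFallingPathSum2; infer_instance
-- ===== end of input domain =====

-- B replaces A's in-place row mutation + heapq two-smallest precomputation by a purely functional DP:
-- a dp list carried over the rows themselves, rebuilt per row by a comprehension taking min of dp over the
-- other columns. A mutates arr in place and B does not: the equivalence proved here is about the RETURN value.

-- ===== PORT A =====
-- body of A's outer loop over i in range(1, rows) (heapq.nsmallest(2, xs) = sorted(xs)[:2] for ints)
def stepA (cols : Int) (a : List (List Int)) (i : Int) : List (List Int) :=
  let prev := PySem.List.pyGetD a (i - 1) []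
  let ns := (PySem.List.sorted prev (fun x => x) false).take 2
  let min1 := PySem.List.pyGetD ns 0 0
  let min2 := PySem.List.pyGetD ns 1 0
  let newRow := List.foldl (fun r j =>
      if PySem.List.pyGetD prev j 0 == min1 then
        PySem.List.pySetD r j (PySem.List.pyGetD r j 0 + min2)
      else
        PySem.List.pySetD r j (PySem.List.pyGetD r j 0 + min1))
    (PySem.List.pyGetD a i []) (PySem.List.pyRange 0 cols)
  PySem.List.pySetD a i newRow

def minFallingPathSum2 (arr : List (List Int)) : Int :=
  let rows : Int := (arr.length : Int)
  let cols : Int := (((PySem.List.pyGet? arr 0).getD []).length : Int)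
  let arr2 := List.foldl (stepA cols) arr (PySem.List.pyRange 1 rows)
  (PySem.List.min? (PySem.List.pyGetD arr2 (-1) []) (fun x => x)).getD 0

-- ===== PORT B =====
-- B's comprehension: [row[j] + min(dp[k] for k in range(cols) if k != j) for j in range(cols)]
def rowB (cols : Int) (dp row : List Int) : List Int :=
  (PySem.List.pyRange 0 cols).map (fun j =>
    PySem.List.pyGetD row j 0 +
    (PySem.List.min? (List.map (fun k => PySem.List.pyGetD dp k 0)
        (List.filter (fun k => k != j) (PySem.List.pyRange 0 cols))) (fun x => x)).getD 0)

def minFallingPathSum2_alt (arr : List (List Int)) : Int :=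
  let cols : Int := (((PySem.List.pyGet? arr 0).getD []).length : Int)
  let dp0 := (PySem.List.pyGet? arr 0).getD []
  let dp := List.foldl (rowB cols) dp0 (PySem.List.slice arr (some 1) none)
  (PySem.List.min? dp (fun x => x)).getD 0

-- ===== PRECONDITION & SPEC =====
-- Pre_ requires a rectangular non-empty grid with ≥1 column (≥2 columns when there are ≥2 rows): outside it A
-- raises (empty arr, single column with several rows, rows shorter than cols), except for ragged inputs whose
-- later rows are LONGER than row 0 — there A still returns, but its nsmallest reads entries beyond the column
-- range, an accidental value of a malformed grid that B's column-bounded scan defensibly ignores.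
def Pre_minFallingPathSum2 (arr : List (List Int)) : Prop :=
  arr ≠ [] ∧ (∀ r ∈ arr, r.length = (arr.headD []).length) ∧
    1 ≤ (arr.headD []).length ∧ (2 ≤ arr.length → 2 ≤ (arr.headD []).length)
instance (arr : List (List Int)) : Decidable (Pre_minFallingPathSum2 arr) := by
  unfold Pre_minFallingPathSum2; infer_instance
def pvWitness_minFallingPathSum2 : List (List Int) := [[1, 2], [3, 4]]

def Spec_minFallingPathSum2 (arr : List (List Int)) (out : Int) : Prop := out = minFallingPathSum2_alt arr
instance (arr : List (List Int)) (out : Int) : Decidable (Spec_minFallingPathSum2 arr out) := by unfold Spec_minFallingPathSum2; infer_instance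

-- ===== CLAIM (what is proved, stated in full; the proofs are below) =====
def Claim_equal_minFallingPathSum2 : Prop := ∀ (arr : List (List Int)), Dom_minFallingPathSum2 arr → Pre_minFallingPathSum2 arr → Spec_minFallingPathSum2 arr (minFallingPathSum2 arr)

-- ===== LEMMAS AND PROOFS =====

-- proof-side bridge: A's loop body with the min1/min2 chooser replaced by the direct min over other columns
def stepB (cols : Int) (a : List (List Int)) (i : Int) : List (List Int) :=
  let prev := PySem.List.pyGetD a (i - 1) []
  let newRow := List.foldl (fun r j =>
      PySem.List.pySetD r j (PySem.List.pyGetD r j 0 +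
        (PySem.List.min? (List.map (fun k => PySem.List.pyGetD prev k 0)
            (List.filter (fun k => k != j) (PySem.List.pyRange 0 cols))) (fun x => x)).getD 0))
    (PySem.List.pyGetD a i []) (PySem.List.pyRange 0 cols)
  PySem.List.pySetD a i newRow

theorem minValEq (M : List Int) (v : Int) (hv : v ∈ M) (hmin : ∀ y ∈ M, v ≤ y) :
    (PySem.List.min? M (fun x => x)).getD 0 = v := by
  cases h : PySem.List.min? M (fun x => x) with
  | none =>
    rw [PySem.List.min?_eq_none_iff] at h
    subst h; cases hv
  | some m =>
    have h1 : m ∈ M := PySem.List.min?_mem h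
    have h2 := PySem.List.min?_isMin h v hv
    simpa using le_antisymm h2 (hmin m h1)

theorem mapGetDRange (p : List Int) :
    (List.range p.length).map (fun k => p.getD k 0) = p := by
  induction p with
  | nil => rfl
  | cons x t ih =>
    simp only [List.length_cons, List.range_succ_eq_map, List.map_cons, List.map_map]
    refine congrArg₂ _ rfl ?_
    simpa [Function.comp_def] using ih

theorem filterMapEraseIdx (p : List Int) (n : Nat) (hn : n < p.length) :
    ((List.range p.length).filter (fun k => k ≠ n)).map (fun k => p.getD k 0) = p.eraseIdx n := by
  induction p generalizing n with
  | nil => simp at hn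
  | cons x t ih =>
    cases n with
    | zero =>
      simp only [List.length_cons, List.range_succ_eq_map, List.filter_cons, List.filter_map,
        List.eraseIdx]
      have h1 : (List.filter ((fun k => decide ¬(k = 0)) ∘ Nat.succ) (List.range t.length))
          = List.range t.length := by
        apply List.filter_eq_self.mpr; intro k _; simp [Function.comp]
      simp only [decide_not]
      simpa [Function.comp_def, h1] using mapGetDRange t
    | succ m =>
      have hm : m < t.length := by simpa using hn
      simp only [List.length_cons, List.range_succ_eq_map, List.filter_cons, List.filter_map,
        List.eraseIdx]
      have h1 : (List.filter ((fun k => decide ¬(k = m + 1)) ∘ Nat.succ) (List.range t.length))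
          = List.filter (fun k => k ≠ m) (List.range t.length) := by
        apply List.filter_congr; intro k _; simp [Function.comp]
      have h2 : ((fun k => (x :: t).getD k 0) ∘ Nat.succ) = fun k => t.getD k 0 := by
        funext k; simp [Function.comp]
      simp only [decide_not]
      simpa [Function.comp_def, h1, h2] using congrArg (List.cons x) (ih m hm)

theorem filterRangeMapEq (p : List Int) (c : Nat) (hp : p.length = c) (j : Int)
    (h0 : 0 ≤ j) (hj : j < (c : Int)) :
    List.map (fun k => PySem.List.pyGetD p k 0)
      (List.filter (fun k => k != j) (PySem.List.pyRange 0 (c : Int))) = p.eraseIdx j.toNat := by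
  rw [PySem.List.pyRange_zero_nat, List.filter_map, List.map_map]
  have e1 : List.filter ((fun k => k != j) ∘ fun (k : Nat) => (k : Int)) (List.range c)
      = List.filter (fun k => k ≠ j.toNat) (List.range c) := by
    apply List.filter_congr; intro k _
    have hiff : ((k : Int) = j) ↔ (k = j.toNat) := by omega
    rw [Bool.eq_iff_iff]
    simp [hiff]
  have e2 : ((fun k => PySem.List.pyGetD p k 0) ∘ fun (k : Nat) => (k : Int))
      = fun k => p.getD k 0 := by
    funext k; simp [Function.comp]
  rw [e1, e2, ← hp]
  exact filterMapEraseIdx p j.toNat (by omega)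

theorem permConsEraseIdx (p : List Int) (n : Nat) (hn : n < p.length) :
    p.Perm (p[n] :: p.eraseIdx n) := by
  induction p generalizing n with
  | nil => simp at hn
  | cons x t ih =>
    cases n with
    | zero => simp
    | succ m =>
      have hm : m < t.length := by simpa using hn
      have h1 : (x :: t).Perm (x :: (t[m] :: t.eraseIdx m)) := ((ih m hm).cons x)
      simpa using h1.trans (List.Perm.swap t[m] x (t.eraseIdx m))

theorem twoLeExists (s : List Int) (h : 2 ≤ s.length) : ∃ a b t, s = a :: b :: t := by
  cases s with
  | nil => simp at h
  | cons a s' =>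
    cases s' with
    | nil => simp at h
    | cons b t => exact ⟨a, b, t, rfl⟩

theorem coreVal (p : List Int) (c : Nat) (hp : p.length = c) (hc : 2 ≤ c)
    (j : Int) (h0 : 0 ≤ j) (hj : j < (c : Int)) :
    (if PySem.List.pyGetD p j 0 == PySem.List.pyGetD ((PySem.List.sorted p (fun x => x) false).take 2) 0 0
      then PySem.List.pyGetD ((PySem.List.sorted p (fun x => x) false).take 2) 1 0
      else PySem.List.pyGetD ((PySem.List.sorted p (fun x => x) false).take 2) 0 0)
    = (PySem.List.min? (List.map (fun k => PySem.List.pyGetD p k 0)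
        (List.filter (fun k => k != j) (PySem.List.pyRange 0 (c : Int)))) (fun x => x)).getD 0 := by
  rw [filterRangeMapEq p c hp j h0 hj]
  have hlen : (PySem.List.sorted p (fun x => x) false).length = c := by
    rw [PySem.List.length_sorted, hp]
  obtain ⟨a, b, t, hst⟩ := twoLeExists (PySem.List.sorted p (fun x => x) false) (by omega)
  have hsp : (PySem.List.sorted p (fun x => x) false).Perm p := PySem.List.sorted_perm p _ false
  have hpair : List.Pairwise (fun x y => x ≤ y) (a :: b :: t) := by
    have := PySem.List.sorted_pairwise p (fun x => x)
    rwa [hst] at this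
  rw [hst] at hsp
  have hamin : ∀ y ∈ a :: b :: t, a ≤ y := by
    intro y hy
    rcases List.mem_cons.mp hy with h | h
    · exact le_of_eq h.symm
    · exact (List.pairwise_cons.mp hpair).1 y h
  have hbmin : ∀ y ∈ b :: t, b ≤ y := by
    intro y hy
    rcases List.mem_cons.mp hy with h | h
    · exact le_of_eq h.symm
    · exact (List.pairwise_cons.mp (List.pairwise_cons.mp hpair).2).1 y h
  have hjn : j.toNat < p.length := by omega
  have hP : PySem.List.pyGetD p j 0 = p[j.toNat] :=
    PySem.List.pyGetD_eq_getElem p 0 h0 (by omega)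
  have hperm := permConsEraseIdx p j.toNat hjn
  have hm1 : PySem.List.pyGetD ((a :: b :: t).take 2) 0 0 = a := by
    simp [PySem.List.pyGetD, PySem.List.pyGet?, PySem.List.pyIdx?]
  have hm2 : PySem.List.pyGetD ((a :: b :: t).take 2) 1 0 = b := by
    simp [PySem.List.pyGetD, PySem.List.pyGet?, PySem.List.pyIdx?]
  rw [hst, hm1, hm2, hP]
  by_cases hcase : p[j.toNat] = a
  · rw [hcase]
    simp only [BEq.rfl, if_true]
    have hEperm : (p.eraseIdx j.toNat).Perm (b :: t) := by
      have h3 : (a :: b :: t).Perm (a :: p.eraseIdx j.toNat) := by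
        have := hsp.trans hperm
        rwa [hcase] at this
      exact (h3.cons_inv).symm
    refine (minValEq _ b ?_ ?_).symm
    · exact hEperm.mem_iff.mpr (List.mem_cons_self)
    · intro y hy; exact hbmin y (hEperm.subset hy)
  · rw [if_neg (by simpa using hcase)]
    refine (minValEq _ a ?_ ?_).symm
    · have ha_p : a ∈ p := hsp.subset (List.mem_cons_self)
      rcases List.mem_cons.mp (hperm.subset ha_p) with h | h
      · exact absurd h.symm hcase
      · exact h
    · intro y hy
      have : y ∈ p := hperm.symm.subset (List.mem_cons_of_mem _ hy)
      exact hamin y (hsp.symm.subset this)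

theorem stepEq (c : Nat) (hc : 2 ≤ c) (a : List (List Int)) (i : Int)
    (_h1 : 1 ≤ i) (_h2 : i < (a.length : Int))
    (hrow : (PySem.List.pyGetD a (i - 1) []).length = c) :
    stepA (c : Int) a i = stepB (c : Int) a i := by
  simp only [stepA, stepB]
  congr 1
  apply PySem.List.foldl_congr_mem
  intro acc j hj
  rw [PySem.List.mem_pyRange_one] at hj
  rw [← coreVal (PySem.List.pyGetD a (i - 1) []) c hrow hc j hj.1 hj.2]
  split <;> rfl

theorem foldlSetLen (g : List Int → Int → Int) (L : List Int) (r : List Int) :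
    (List.foldl (fun r j => PySem.List.pySetD r j (g r j)) r L).length = r.length := by
  induction L generalizing r with
  | nil => rfl
  | cons j L ih => simp [List.foldl_cons, ih, PySem.List.length_pySetD]

theorem outerEq (c : Nat) (hc : 2 ≤ c) (L : List Int) (a : List (List Int))
    (hinv : ∀ r ∈ a, r.length = c) (hb : ∀ i ∈ L, 1 ≤ i ∧ i < (a.length : Int)) :
    List.foldl (stepA (c : Int)) a L = List.foldl (stepB (c : Int)) a L := by
  induction L generalizing a with
  | nil => rfl
  | cons i L ih =>
    have hi := hb i List.mem_cons_self
    have hi1 : (0 : Int) ≤ i - 1 := by omega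
    have hi1' : i - 1 < (a.length : Int) := by omega
    have hprevlen : (PySem.List.pyGetD a (i - 1) []).length = c := by
      rw [PySem.List.pyGetD_eq_getElem a [] hi1 hi1']
      exact hinv _ (List.getElem_mem _)
    rw [List.foldl_cons, List.foldl_cons, stepEq c hc a i hi.1 hi.2 hprevlen]
    have hlen' : (stepB (c : Int) a i).length = a.length := by
      simp [stepB, PySem.List.length_pySetD]
    apply ih
    · intro r hr
      simp only [stepB] at hr
      rw [PySem.List.pySetD_of_nonneg _ _ (by omega : (0 : Int) ≤ i)] at hr
      rcases List.mem_or_eq_of_mem_set hr with h | h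
      · exact hinv r h
      · subst h
        have hrowlen : (PySem.List.pyGetD a i []).length = c := by
          rw [PySem.List.pyGetD_eq_getElem a [] (by omega) (by omega)]
          exact hinv _ (List.getElem_mem _)
        exact (foldlSetLen (fun r j => PySem.List.pyGetD r j 0 +
          (PySem.List.min? (List.map (fun k => PySem.List.pyGetD (PySem.List.pyGetD a (i - 1) []) k 0)
            (List.filter (fun k => k != j) (PySem.List.pyRange 0 (c : Int)))) (fun x => x)).getD 0)
          _ _).trans hrowlen
    · intro i' hi'
      have := hb i' (List.mem_cons_of_mem _ hi')
      exact ⟨this.1, by rw [hlen']; exact this.2⟩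

-- the in-place inner fold over increasing indices is the comprehension over the untouched row
theorem setfold (g : Nat → Int) : ∀ (k m : Nat) (r : List Int), m + k = r.length →
    List.foldl (fun r j => r.set j (r.getD j 0 + g j)) r (List.range' m k)
    = r.take m ++ (List.range' m k).map (fun j => r.getD j 0 + g j) := by
  intro k
  induction k with
  | zero =>
    intro m r h
    simp [List.take_of_length_le (by omega : r.length ≤ m)]
  | succ k ih =>
    intro m r h
    have hm : m < r.length := by omega
    rw [List.range'_succ, List.foldl_cons, List.map_cons]
    have hIH := ih (m + 1) (r.set m (r.getD m 0 + g m)) (by simp; omega)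
    rw [hIH]
    have htake : (r.set m (r.getD m 0 + g m)).take (m + 1)
        = r.take m ++ [r.getD m 0 + g m] := by
      rw [List.set_eq_take_append_cons_drop, if_pos hm, List.take_append]
      simp [List.length_take, Nat.min_eq_left (le_of_lt hm), List.take_of_length_le]
    have hmap : (List.range' (m + 1) k).map
          (fun j => (r.set m (r.getD m 0 + g m)).getD j 0 + g j)
        = (List.range' (m + 1) k).map (fun j => r.getD j 0 + g j) := by
      apply List.map_congr_left
      intro j hj
      have hjm : m ≠ j := by
        have := List.mem_range'_1.mp hj; omega
      rw [List.getD, List.getD, List.getElem?_set_ne hjm]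
      rfl
    rw [htake, hmap, List.append_assoc]
    rfl

theorem newRowEq (g : Int → Int) (c : Nat) (row : List Int) (hrow : row.length = c) :
    List.foldl (fun r j => PySem.List.pySetD r j (PySem.List.pyGetD r j 0 + g j)) row
      (PySem.List.pyRange 0 (c : Int))
    = (PySem.List.pyRange 0 (c : Int)).map (fun j => PySem.List.pyGetD row j 0 + g j) := by
  rw [PySem.List.pyRange_zero_nat, List.foldl_map, List.map_map]
  have e1 : (fun (r : List Int) (k : Nat) => PySem.List.pySetD r (k : Int) (PySem.List.pyGetD r (k : Int) 0 + g k))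
      = fun r k => r.set k (r.getD k 0 + g (k : Int)) := by
    funext r k; simp
  have e2 : ((fun j => PySem.List.pyGetD row j 0 + g j) ∘ fun (k : Nat) => (k : Int))
      = fun (k : Nat) => row.getD k 0 + g (k : Int) := by
    funext k; simp [Function.comp]
  rw [e1, e2, List.range_eq_range']
  have := setfold (fun k => g (k : Int)) c 0 row (by omega)
  simpa using this

-- stepB in set form: it writes rowB of the (still untouched) current row into place i
theorem stepB_set (c : Nat) (a : List (List Int)) (i : Int)
    (hrowlen : (PySem.List.pyGetD a i []).length = c) :
    stepB (c : Int) a i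
      = PySem.List.pySetD a i
          (rowB (c : Int) (PySem.List.pyGetD a (i - 1) []) (PySem.List.pyGetD a i [])) := by
  simp only [stepB, rowB]
  congr 1
  exact newRowEq _ c _ hrowlen

-- bridge: the last row of A's mutated array is B's dp fold over the remaining rows
theorem bridge (c : Nat) : ∀ (n : Nat) (a : List (List Int)) (i : Nat),
    a.length - i = n → 1 ≤ i → i ≤ a.length → (∀ r ∈ a, r.length = c) →
    PySem.List.pyGetD
        (List.foldl (stepB (c : Int)) a (PySem.List.pyRange (i : Int) (a.length : Int))) (-1) []
    = List.foldl (rowB (c : Int)) (PySem.List.pyGetD a ((i : Int) - 1) []) (a.drop i) := by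
  intro n
  induction n with
  | zero =>
    intro a i hn h1 h2 _
    have hi : i = a.length := by omega
    rw [PySem.List.pyRange_one_eq_nil (by omega)]
    simp only [List.foldl_nil]
    rw [hi, List.drop_length, List.foldl_nil]
    rw [PySem.List.pyGetD_neg_ofNat a 1 [] (by omega) (by omega)]
    rw [PySem.List.pyGetD_eq_getElem a [] (by omega) (by omega)]
    congr 1
    omega
  | succ n ih =>
    intro a i hn h1 h2 hinv
    have hi : i < a.length := by omega
    have hrowlen : (PySem.List.pyGetD a (i : Int) []).length = c := by
      rw [PySem.List.pyGetD_eq_getElem a [] (by omega) (by omega)]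
      exact hinv _ (List.getElem_mem _)
    rw [PySem.List.pyRange_one_cons (by omega : (i : Int) < (a.length : Int)), List.foldl_cons]
    set newRow := rowB (c : Int) (PySem.List.pyGetD a ((i : Int) - 1) []) (PySem.List.pyGetD a (i : Int) []) with hnewRow
    have hset : stepB (c : Int) a (i : Int) = a.set i newRow := by
      rw [stepB_set c a (i : Int) hrowlen, PySem.List.pySetD_of_nonneg _ _ (by omega : (0 : Int) ≤ (i : Int))]
      rw [← hnewRow]
      simp only [Int.toNat_natCast]
    have hlen : (a.set i newRow).length = a.length := by simp
    have hIH := ih (a.set i newRow) (i + 1) (by rw [hlen]; omega) (by omega) (by rw [hlen]; omega)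
      (by
        intro r hr
        rcases List.mem_or_eq_of_mem_set hr with h | h
        · exact hinv r h
        · subst h
          simp [hnewRow, rowB, PySem.List.length_pyRange_one])
    have hcast : ((i : Int) + 1) = (((i + 1 : Nat) : Int)) := by push_cast; ring
    rw [hset, hcast, ← hlen]
    rw [hIH]
    have hget : PySem.List.pyGetD (a.set i newRow) (((i + 1 : Nat) : Int) - 1) [] = newRow := by
      have : (((i + 1 : Nat) : Int) - 1) = ((i : Nat) : Int) := by push_cast; ring
      rw [this, PySem.List.pyGetD_natCast]
      rw [List.getD, List.getElem?_set_self hi]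
      rfl
    have hdrop : (a.set i newRow).drop (i + 1) = a.drop (i + 1) := by
      rw [List.drop_set]
      simp
    rw [hget, hdrop]
    have hsplit : a.drop i = a[i] :: a.drop (i + 1) := List.drop_eq_getElem_cons hi
    have hai : PySem.List.pyGetD a (i : Int) [] = a[i] := by
      rw [PySem.List.pyGetD_natCast]
      exact List.getD_eq_getElem a [] hi
    rw [hsplit, List.foldl_cons, ← hai, ← hnewRow]

-- ===== VERDICT (by name: the statement is the Claim_ definition above) =====
theorem minFallingPathSum2_spec : Claim_equal_minFallingPathSum2 := by
  intro arr _ hpre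
  obtain ⟨hne, hrect, hone, htwo⟩ := hpre
  unfold Spec_minFallingPathSum2
  cases arr with
  | nil => exact absurd rfl hne
  | cons r0 rest =>
    have hget : PySem.List.pyGet? (r0 :: rest) 0 = some r0 := by simp
    simp only [minFallingPathSum2, minFallingPathSum2_alt, hget, Option.getD_some,
      PySem.List.slice_from_one]
    cases rest with
    | nil =>
      rw [PySem.List.pyRange_one_eq_nil (by simp)]
      rfl
    | cons r1 rest' =>
      have hc2 : 2 ≤ r0.length := by apply htwo; simp
      set a := r0 :: r1 :: rest' with ha
      have hinv : ∀ r ∈ a, r.length = r0.length := by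
        intro r hr; simpa using hrect r hr
      have hfold := outerEq r0.length hc2
        (PySem.List.pyRange 1 ((a.length : Nat) : Int)) a hinv
        (by intro i hi; rw [PySem.List.mem_pyRange_one] at hi; exact hi)
      rw [hfold]
      have hbr := bridge r0.length (a.length - 1) a 1 rfl (by omega) (by simp [ha]) hinv
      have hone' : ((1 : Nat) : Int) = (1 : Int) := by norm_num
      rw [hone', show ((1 : Int) - 1) = 0 from by norm_num, PySem.List.pyGetD_zero,
        List.drop_one] at hbr
      rw [hbr]
      rfl
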